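-- pv_equiv track=rewrite | github.com/EditFusion/EditFusion | mergebert_replication/utils.py | apply_pattern
-- ===== SOURCE A (Python) =====
-- def apply_pattern(pattern, a, b, o):
--     if pattern == "select_a": return a
--     if pattern == "select_b": return b
--     if pattern == "select_o": return o
--     if pattern == "concat_ab": return a + b
--     if pattern == "concat_ba": return b + a
--     o_set = set(o)
--     if pattern == "select_a_del_o": return [token for token in a if token not in o_set]
--     if pattern == "select_b_del_o": return [token for token in b if token not in o_set]
--     if pattern == "concat_ab_del_o": return [token for token in a + b if token not in o_set]
--     if pattern == "concat_ba_del_o": return [token for token in b + a if token not in o_set]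
--     return None
-- ===== SOURCE B (Python) =====
-- def apply_pattern(pattern, a, b, o):
--     # Parse pattern as [select_|concat_]<letters>[_del_o]; build the result by a
--     # generic per-letter accumulation loop instead of per-pattern cases.
--     if pattern.endswith("_del_o"):
--         deleting, core = True, pattern[:-6]
--     else:
--         deleting, core = False, pattern
--     if core.startswith("select_"):
--         allowed = ("a", "b", "o")
--     elif core.startswith("concat_"):
--         allowed = ("ab", "ba")
--     else:
--         return None
--     letters = core[7:]
--     if letters not in allowed or (deleting and "o" in letters):
--         return None
--     result = []
--     for ch in letters:
--         result += a if ch == "a" else b if ch == "b" else o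
--     if deleting:
--         o_set = set(o)
--         result = [t for t in result if t not in o_set]
--     return result
-- ===== Notes on version B (the rewrite author's own statement) =====
-- stated objective: alternative
-- what changed: A dispatches on nine literal pattern strings each returning a hard-coded list combination; B parses the pattern into an optional '_del_o' suffix, a 'select_'/'concat_' prefix and a selector-letter string, computes the result generically by one accumulation loop over the selector letters, and applies the exclusion filter once.
import Mathlib
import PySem

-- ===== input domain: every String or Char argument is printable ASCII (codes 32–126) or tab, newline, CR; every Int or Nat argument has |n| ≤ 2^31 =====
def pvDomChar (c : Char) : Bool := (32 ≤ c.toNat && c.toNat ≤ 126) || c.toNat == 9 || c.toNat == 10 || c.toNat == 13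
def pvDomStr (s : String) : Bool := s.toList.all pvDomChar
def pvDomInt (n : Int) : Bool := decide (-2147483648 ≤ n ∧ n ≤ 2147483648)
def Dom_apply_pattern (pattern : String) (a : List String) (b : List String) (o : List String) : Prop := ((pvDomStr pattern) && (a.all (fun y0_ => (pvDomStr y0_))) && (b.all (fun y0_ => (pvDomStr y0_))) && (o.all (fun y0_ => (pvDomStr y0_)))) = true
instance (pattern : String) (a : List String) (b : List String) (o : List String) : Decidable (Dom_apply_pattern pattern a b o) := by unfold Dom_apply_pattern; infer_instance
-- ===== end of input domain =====

-- B replaces A's nine literal pattern cases by a parser (optional '_del_o' suffix, 'select_'/'concat_'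
-- prefix, selector letters) plus one generic per-letter accumulation loop and a single filter (alternative decomposition).

-- ===== PORT A =====
def apply_pattern (pattern : String) (a : List String) (b : List String) (o : List String) : Option (List String) :=
  if pattern = "select_a" then some a
  else if pattern = "select_b" then some b
  else if pattern = "select_o" then some o
  else if pattern = "concat_ab" then some (a ++ b)
  else if pattern = "concat_ba" then some (b ++ a)
  else
    let o_set : PySem.Set String := PySem.Set.ofList o
    if pattern = "select_a_del_o" then some (a.filter (fun token => !(o_set.contains token)))
    else if pattern = "select_b_del_o" then some (b.filter (fun token => !(o_set.contains token)))
    else if pattern = "concat_ab_del_o" then some ((a ++ b).filter (fun token => !(o_set.contains token)))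
    else if pattern = "concat_ba_del_o" then some ((b ++ a).filter (fun token => !(o_set.contains token)))
    else none

-- ===== PORT B =====
def apply_pattern_alt (pattern : String) (a : List String) (b : List String) (o : List String) : Option (List String) :=
  let deleting := PySem.Str.endswith pattern "_del_o"
  let core := if deleting then PySem.Str.slice pattern none (some (-6)) else pattern
  -- the if/elif/else chain assigning 'allowed' (None = the final 'return None' branch)
  let allowed? : Option (List String) :=
    if PySem.Str.startswith core "select_" then some ["a", "b", "o"]
    else if PySem.Str.startswith core "concat_" then some ["ab", "ba"]
    else none
  match allowed? with
  | none => none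
  | some allowed =>
    let letters := PySem.Str.slice core (some 7) none
    if !(allowed.contains letters) || (deleting && PySem.Str.isIn "o" letters) then none
    else
      let result := letters.toList.foldl
        (fun acc ch => acc ++ (if ch = 'a' then a else if ch = 'b' then b else o)) []
      if deleting then
        let o_set : PySem.Set String := PySem.Set.ofList o
        some (result.filter (fun t => !(o_set.contains t)))
      else some result

-- ===== PRECONDITION & SPEC =====
def Spec_apply_pattern (pattern : String) (a : List String) (b : List String) (o : List String) (out : Option (List String)) : Prop := out = apply_pattern_alt pattern a b o
instance (pattern : String) (a : List String) (b : List String) (o : List String) (out : Option (List String)) : Decidable (Spec_apply_pattern pattern a b o out) := by unfold Spec_apply_pattern; infer_instance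

-- ===== CLAIM =====
def Claim_equal_apply_pattern : Prop := ∀ (pattern : String) (a : List String) (b : List String) (o : List String), Dom_apply_pattern pattern a b o → Spec_apply_pattern pattern a b o (apply_pattern pattern a b o)

-- ===== LEMMAS AND PROOFS =====

-- a string ending in "_del_o" is its [:-6] slice followed by "_del_o"
lemma endswith_del_o_decomp (s : String) (h : PySem.Str.endswith s "_del_o" = true) :
    s.toList = (PySem.Str.slice s none (some (-6))).toList ++ "_del_o".toList := by
  obtain ⟨t, ht⟩ := (PySem.Chars.endswith_iff s.toList "_del_o".toList).mp (by simpa using h)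
  have hslice : (PySem.Str.slice s none (some (-6))).toList = s.toList.take (s.toList.length - 6) := by
    simp [PySem.Str.slice]
    rw [PySem.List.slice_to_neg_ofNat _ 6 (by omega)]
    simp
  rw [hslice, ← ht]; simp

-- a string starting with a 7-character prefix is that prefix followed by its [7:] slice
lemma startswith7_decomp (s p : String) (hp : p.toList.length = 7)
    (h : PySem.Str.startswith s p = true) :
    s.toList = p.toList ++ (PySem.Str.slice s (some 7) none).toList := by
  obtain ⟨t, ht⟩ := (PySem.Chars.startswith_iff s.toList p.toList).mp (by simpa using h)
  have hslice : (PySem.Str.slice s (some 7) none).toList = s.toList.drop 7 := by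
    simp [PySem.Str.slice]
    rw [PySem.List.slice_from _ (by norm_num)]
    simp
  have hdrop : List.drop 7 (p.toList ++ t) = t := by
    rw [← hp]; exact List.drop_left
  rw [hslice, ← ht, hdrop]

-- ===== VERDICT =====
theorem apply_pattern_spec : Claim_equal_apply_pattern := by
  intro pattern a b o _hdom
  unfold Spec_apply_pattern
  by_cases h1 : pattern = "select_a"; · subst h1; rfl
  by_cases h2 : pattern = "select_b"; · subst h2; rfl
  by_cases h3 : pattern = "select_o"; · subst h3; rfl
  by_cases h4 : pattern = "concat_ab"; · subst h4; rfl
  by_cases h5 : pattern = "concat_ba"; · subst h5; rfl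
  by_cases h6 : pattern = "select_a_del_o"; · subst h6; rfl
  by_cases h7 : pattern = "select_b_del_o"; · subst h7; rfl
  by_cases h8 : pattern = "concat_ab_del_o"; · subst h8; rfl
  by_cases h9 : pattern = "concat_ba_del_o"; · subst h9; rfl
  by_cases h10 : pattern = "select_o_del_o"; · subst h10; rfl
  -- generic case: pattern names none of the selections; both programs return none
  have hA : apply_pattern pattern a b o = none := by
    simp [apply_pattern, h1, h2, h3, h4, h5, h6, h7, h8, h9]
  rw [hA]
  unfold apply_pattern_alt
  by_cases hE : PySem.Str.endswith pattern "_del_o" = true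
  · simp only [hE, if_true]
    have hdec := endswith_del_o_decomp pattern hE
    set core := PySem.Str.slice pattern none (some (-6)) with hcore
    by_cases hS : PySem.Str.startswith core "select_" = true
    · have hS' : PySem.Chars.startswith core.toList ['s','e','l','e','c','t','_'] = true := by simpa using hS
      have hcd := startswith7_decomp core "select_" (by decide) hS
      set letters := PySem.Str.slice core (some 7) none with hlet
      have pat_eq : pattern.toList = ("select_".toList ++ letters.toList) ++ "_del_o".toList := by
        rw [hdec, hcd]
      by_cases ga : letters = "a"
      · exfalso; apply h6; apply String.ext; rw [pat_eq, ga]; decide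
      by_cases gb : letters = "b"
      · exfalso; apply h7; apply String.ext; rw [pat_eq, gb]; decide
      by_cases go : letters = "o"
      · simp [hS', go]; decide
      · simp [hS', ga, gb, go]
    · have hS' : PySem.Chars.startswith core.toList ['s','e','l','e','c','t','_'] = false := by
        simpa using hS
      by_cases hC : PySem.Str.startswith core "concat_" = true
      · have hC' : PySem.Chars.startswith core.toList ['c','o','n','c','a','t','_'] = true := by simpa using hC
        have hcd := startswith7_decomp core "concat_" (by decide) hC
        set letters := PySem.Str.slice core (some 7) none with hlet
        have pat_eq : pattern.toList = ("concat_".toList ++ letters.toList) ++ "_del_o".toList := by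
          rw [hdec, hcd]
        by_cases gab : letters = "ab"
        · exfalso; apply h8; apply String.ext; rw [pat_eq, gab]; decide
        by_cases gba : letters = "ba"
        · exfalso; apply h9; apply String.ext; rw [pat_eq, gba]; decide
        · simp [hS', hC', gab, gba]
      · have hC' : PySem.Chars.startswith core.toList ['c','o','n','c','a','t','_'] = false := by
          simpa using hC
        simp [hS', hC']
  · have hE' : PySem.Str.endswith pattern "_del_o" = false := by simpa using hE
    simp only [hE', Bool.false_and]
    by_cases hS : PySem.Str.startswith pattern "select_" = true
    · have hS' : PySem.Chars.startswith pattern.toList ['s','e','l','e','c','t','_'] = true := by simpa using hS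
      have hcd := startswith7_decomp pattern "select_" (by decide) hS
      set letters := PySem.Str.slice pattern (some 7) none with hlet
      by_cases ga : letters = "a"
      · exfalso; apply h1; apply String.ext; rw [hcd, ga]; decide
      by_cases gb : letters = "b"
      · exfalso; apply h2; apply String.ext; rw [hcd, gb]; decide
      by_cases go : letters = "o"
      · exfalso; apply h3; apply String.ext; rw [hcd, go]; decide
      · simp [hS']; exact ⟨ga, gb, go⟩
    · have hS' : PySem.Chars.startswith pattern.toList ['s','e','l','e','c','t','_'] = false := by
        simpa using hS
      by_cases hC : PySem.Str.startswith pattern "concat_" = true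
      · have hC' : PySem.Chars.startswith pattern.toList ['c','o','n','c','a','t','_'] = true := by simpa using hC
        have hcd := startswith7_decomp pattern "concat_" (by decide) hC
        set letters := PySem.Str.slice pattern (some 7) none with hlet
        by_cases gab : letters = "ab"
        · exfalso; apply h4; apply String.ext; rw [hcd, gab]; decide
        by_cases gba : letters = "ba"
        · exfalso; apply h5; apply String.ext; rw [hcd, gba]; decide
        · simp [hS', hC']; exact ⟨gab, gba⟩
      · have hC' : PySem.Chars.startswith pattern.toList ['c','o','n','c','a','t','_'] = false := by
          simpa using hC
        simp [hS', hC']
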